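-- pv_equiv track=rewrite | github.com/gino2013/LucianLeetcodeDaily | solutions/2025-09-03/3027_final.py | _sparse_case_solution
-- ===== SOURCE A (Python) =====
-- def _sparse_case_solution(points):
--     """處理稀疏分布的情況"""
--     n = len(points)
--     count = 0
--
--     # 預計算所有點對的距離和關係
--     for i in range(n):
--         alice_x, alice_y = points[i]
--
--         # 收集並排序可能的 Bob 位置
--         candidates = []
--         for j in range(n):
--             if i != j:
--                 bob_x, bob_y = points[j]
--                 if alice_x <= bob_x and alice_y >= bob_y:
--                     # 按面積排序，優先檢查小矩形
--                     area = (bob_x - alice_x + 1) * (alice_y - bob_y + 1)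
--                     candidates.append((area, bob_x, bob_y, j))
--
--         candidates.sort()  # 按面積升序排序
--
--         for area, bob_x, bob_y, j in candidates:
--             # 如果矩形太大，後續的也會很大，可以提前結束
--             if area > n:
--                 break
--
--             valid = True
--             for k in range(n):
--                 if k != i and k != j:
--                     x, y = points[k]
--                     if alice_x <= x <= bob_x and bob_y <= y <= alice_y:
--                         valid = False
--                         break
--
--             if valid:
--                 count += 1
--
--     return count
-- ===== SOURCE B (Python) =====
-- def _sparse_case_solution(points):
--     n = len(points)
--     count = 0
--     for i in range(n):
--         ax, ay = points[i]
--         # candidate Bob positions: down-right region of Alice (inclusive)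
--         cand = []
--         for j in range(n):
--             if j != i:
--                 x, y = points[j]
--                 if ax <= x and y <= ay:
--                     cand.append((x, y))
--         occ = {}
--         for p in cand:
--             occ[p] = occ.get(p, 0) + 1
--         cand.sort(key=lambda p: (p[0], -p[1]))
--         # sweep left-to-right, top-to-bottom: a candidate is a valid Bob iff it
--         # strictly dominates (in y) everything already swept, is unique among
--         # the candidates, and the rectangle area is at most n
--         best = None
--         for x, y in cand:
--             if best is None or y > best:
--                 if occ[(x, y)] == 1 and (x - ax + 1) * (ay - y + 1) <= n:
--                     count += 1
--                 best = y
--     return count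
-- ===== Notes on version B (the rewrite author's own statement) =====
-- stated objective: faster
-- what changed: A checks every candidate pair with an inner O(n) blocker scan over all points; B, per Alice point, sorts the candidate Bobs by (x, -y) and sweeps them with a running max-y plus a duplicate counter, deciding each pair's emptiness in O(1).
import Mathlib
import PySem

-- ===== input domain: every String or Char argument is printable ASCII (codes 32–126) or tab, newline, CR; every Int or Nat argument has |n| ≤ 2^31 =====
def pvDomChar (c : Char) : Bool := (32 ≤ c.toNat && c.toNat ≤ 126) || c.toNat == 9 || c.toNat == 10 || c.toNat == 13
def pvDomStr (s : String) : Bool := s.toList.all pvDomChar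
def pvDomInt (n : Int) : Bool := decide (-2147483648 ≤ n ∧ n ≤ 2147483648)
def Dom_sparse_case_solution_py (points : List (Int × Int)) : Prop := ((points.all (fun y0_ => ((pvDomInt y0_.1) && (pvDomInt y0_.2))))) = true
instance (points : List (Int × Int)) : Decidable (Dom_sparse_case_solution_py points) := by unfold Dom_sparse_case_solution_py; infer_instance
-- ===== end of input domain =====

-- B replaces A's cubic per-pair blocker scan by a per-Alice sort-and-sweep (max-y dominance) with a duplicate counter; return value only, no mutation.

-- ===== PORT A =====
-- candidates built in the j-loop: (area, bob_x, bob_y, j) for j != i with alice_x <= bob_x, alice_y >= bob_y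
def pvACands (points : List (Int × Int)) (i ax ay : Int) : List Int → List (Int × Int × Int × Int)
  | [] => []
  | j :: js =>
    if i ≠ j then
      let b := PySem.List.pyGetD points j (0, 0)
      if ax ≤ b.1 ∧ ay ≥ b.2 then
        ((b.1 - ax + 1) * (ay - b.2 + 1), b.1, b.2, j) :: pvACands points i ax ay js
      else pvACands points i ax ay js
    else pvACands points i ax ay js

-- Python sorts 4-tuples lexicographically: the sort key is the lexicographic product order
def pvKeyA (t : Int × Int × Int × Int) : Int ×ₗ (Int ×ₗ (Int ×ₗ Int)) :=
  toLex (t.1, toLex (t.2.1, toLex (t.2.2.1, t.2.2.2)))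

-- the k-loop computing `valid` (break on the first blocker = returning false)
def pvAValid (points : List (Int × Int)) (i j ax ay bx byv : Int) : List Int → Bool
  | [] => true
  | k :: ks =>
    if k ≠ i ∧ k ≠ j then
      let q := PySem.List.pyGetD points k (0, 0)
      if ax ≤ q.1 ∧ q.1 ≤ bx ∧ byv ≤ q.2 ∧ q.2 ≤ ay then false
      else pvAValid points i j ax ay bx byv ks
    else pvAValid points i j ax ay bx byv ks

-- the loop over the sorted candidates, breaking as soon as area > n
def pvAScan (points : List (Int × Int)) (n i ax ay : Int) : List (Int × Int × Int × Int) → Int → Int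
  | [], c => c
  | t :: rest, c =>
    if t.1 > n then c
    else pvAScan points n i ax ay rest
      (if pvAValid points i t.2.2.2 ax ay t.2.1 t.2.2.1 (PySem.List.pyRange 0 n 1) then c + 1 else c)

def sparse_case_solution_py (points : List (Int × Int)) : Int :=
  let n : Int := points.length
  (PySem.List.pyRange 0 n 1).foldl (fun count i =>
    let a := PySem.List.pyGetD points i ((0 : Int), (0 : Int))
    pvAScan points n i a.1 a.2
      (PySem.List.sorted (pvACands points i a.1 a.2 (PySem.List.pyRange 0 n 1)) pvKeyA) count) 0

-- ===== PORT B =====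
-- candidate Bob positions for Alice i: the j-loop of Source B
def pvBCands (points : List (Int × Int)) (i ax ay : Int) : List Int → List (Int × Int)
  | [] => []
  | j :: js =>
    if j ≠ i then
      let b := PySem.List.pyGetD points j (0, 0)
      if ax ≤ b.1 ∧ b.2 ≤ ay then b :: pvBCands points i ax ay js
      else pvBCands points i ax ay js
    else pvBCands points i ax ay js

-- sort key (p[0], -p[1]) : lexicographic pair
def pvKeyB (p : Int × Int) : Int ×ₗ Int := toLex (p.1, -p.2)

-- the sweep: best is None | some b; count a candidate iff it beats best, is unique, and its area fits
def pvBSweep (occ : PySem.Dict (Int × Int) Int) (n ax ay : Int) :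
    List (Int × Int) → Option Int → Int → Int
  | [], _, c => c
  | p :: rest, best, c =>
    if (match best with | none => true | some b => decide (b < p.2)) = true then
      pvBSweep occ n ax ay rest (some p.2)
        (if occ.getD p 0 = 1 ∧ (p.1 - ax + 1) * (ay - p.2 + 1) ≤ n then c + 1 else c)
    else pvBSweep occ n ax ay rest best c

def sparse_case_solution_py_alt (points : List (Int × Int)) : Int :=
  let n : Int := points.length
  (PySem.List.pyRange 0 n 1).foldl (fun count i =>
    let a := PySem.List.pyGetD points i ((0 : Int), (0 : Int))
    let cand := pvBCands points i a.1 a.2 (PySem.List.pyRange 0 n 1)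
    let occ := cand.foldl (fun d p => d.insert p (d.getD p 0 + 1)) PySem.Dict.empty
    pvBSweep occ n a.1 a.2 (PySem.List.sorted cand pvKeyB) none count) 0

-- ===== PRECONDITION & SPEC =====
def Spec_sparse_case_solution_py (points : List (Int × Int)) (out : Int) : Prop := out = sparse_case_solution_py_alt points
instance (points : List (Int × Int)) (out : Int) : Decidable (Spec_sparse_case_solution_py points out) := by unfold Spec_sparse_case_solution_py; infer_instance

-- ===== CLAIM (what is proved, stated in full; the proofs are below) =====
def Claim_equal_sparse_case_solution_py : Prop := ∀ (points : List (Int × Int)), Dom_sparse_case_solution_py points → Spec_sparse_case_solution_py points (sparse_case_solution_py points)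

-- ===== LEMMAS AND PROOFS =====

-- point k of ps (out-of-range default never used on admitted indices)
def pvPt (ps : List (Int × Int)) (k : Nat) : Int × Int := ps.getD k (0, 0)

def pvArea (ps : List (Int × Int)) (i j : Nat) : Int :=
  ((pvPt ps j).1 - (pvPt ps i).1 + 1) * ((pvPt ps i).2 - (pvPt ps j).2 + 1)

abbrev pvGeom (ps : List (Int × Int)) (i j : Nat) : Prop :=
  (pvPt ps i).1 ≤ (pvPt ps j).1 ∧ (pvPt ps j).2 ≤ (pvPt ps i).2

abbrev pvBlockfree (ps : List (Int × Int)) (i j : Nat) : Prop :=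
  ∀ k, k < ps.length → k ≠ i → k ≠ j →
    ¬((pvPt ps i).1 ≤ (pvPt ps k).1 ∧ (pvPt ps k).1 ≤ (pvPt ps j).1 ∧
      (pvPt ps j).2 ≤ (pvPt ps k).2 ∧ (pvPt ps k).2 ≤ (pvPt ps i).2)

abbrev pvP (ps : List (Int × Int)) (i j : Nat) : Prop :=
  j ≠ i ∧ pvGeom ps i j ∧ pvArea ps i j ≤ (ps.length : Int) ∧ pvBlockfree ps i j

def pvCount (ps : List (Int × Int)) (i : Nat) : Int :=
  ((List.range ps.length).countP (fun j => decide (pvP ps i j)) : Int)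

-- ---------- A side ----------

def pvAf (ps : List (Int × Int)) (i ax ay : Int) (j : Int) : Option (Int × Int × Int × Int) :=
  let b := PySem.List.pyGetD ps j (0, 0)
  if i ≠ j ∧ ax ≤ b.1 ∧ ay ≥ b.2 then some ((b.1 - ax + 1) * (ay - b.2 + 1), b.1, b.2, j) else none

theorem pvACands_eq (ps : List (Int × Int)) (i ax ay : Int) (L : List Int) :
    pvACands ps i ax ay L = L.filterMap (pvAf ps i ax ay) := by
  induction L with
  | nil => rfl
  | cons j js ih =>
    simp only [pvACands, pvAf, List.filterMap_cons]
    split_ifs <;> simp_all [pvAf]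

theorem pvAValid_iff (ps : List (Int × Int)) (i j ax ay bx byv : Int) (L : List Int) :
    pvAValid ps i j ax ay bx byv L = true ↔
      ∀ k ∈ L, k ≠ i → k ≠ j →
        ¬(ax ≤ (PySem.List.pyGetD ps k (0, 0)).1 ∧ (PySem.List.pyGetD ps k (0, 0)).1 ≤ bx ∧
          byv ≤ (PySem.List.pyGetD ps k (0, 0)).2 ∧ (PySem.List.pyGetD ps k (0, 0)).2 ≤ ay) := by
  induction L with
  | nil => simp [pvAValid]
  | cons k ks ih =>
    simp only [pvAValid, List.mem_cons]
    split_ifs with h1 h2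
    · constructor
      · intro h; cases h
      · intro h; exact absurd h2 (h k (Or.inl rfl) h1.1 h1.2)
    · rw [ih]
      constructor
      · intro h a ha; rcases ha with rfl | ha
        · intro _ _; exact h2
        · exact h a ha
      · intro h a ha; exact h a (Or.inr ha)
    · rw [ih]
      constructor
      · intro h a ha hai haj; rcases ha with rfl | ha
        · exact absurd ⟨hai, haj⟩ h1
        · exact h a ha hai haj
      · intro h a ha; exact h a (Or.inr ha)

def pvAPred (ps : List (Int × Int)) (n i ax ay : Int) (t : Int × Int × Int × Int) : Bool :=
  decide (t.1 ≤ n) && pvAValid ps i t.2.2.2 ax ay t.2.1 t.2.2.1 (PySem.List.pyRange 0 n 1)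

theorem pvAScan_eq (ps : List (Int × Int)) (n i ax ay : Int) (S : List (Int × Int × Int × Int))
    (h : S.Pairwise (fun a b => a.1 ≤ b.1)) (c : Int) :
    pvAScan ps n i ax ay S c = c + (S.countP (pvAPred ps n i ax ay) : Int) := by
  induction S generalizing c with
  | nil => simp [pvAScan]
  | cons t rest ih =>
    rw [List.pairwise_cons] at h
    simp only [pvAScan]
    by_cases hn : t.1 > n
    · rw [if_pos hn]
      have hz : (t :: rest).countP (pvAPred ps n i ax ay) = 0 := by
        rw [List.countP_eq_zero]
        intro a ha
        have hgt : ¬(a.1 ≤ n) := by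
          rcases List.mem_cons.mp ha with rfl | ha'
          · omega
          · have := h.1 a ha'; omega
        simp [pvAPred, hgt]
      rw [hz]; simp
    · rw [if_neg hn, ih h.2, List.countP_cons]
      have hle : decide (t.1 ≤ n) = true := by simp; omega
      simp only [pvAPred, hle, Bool.true_and]
      by_cases hv : pvAValid ps i t.2.2.2 ax ay t.2.1 t.2.2.1 (PySem.List.pyRange 0 n 1) = true
      · simp only [hv, if_pos]; push_cast; ring
      · simp only [Bool.not_eq_true] at hv
        simp only [hv]; push_cast; ring

theorem pvSortedA_pairwise (l : List (Int × Int × Int × Int)) :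
    (PySem.List.sorted l pvKeyA).Pairwise (fun a b => a.1 ≤ b.1) := by
  refine (PySem.List.sorted_pairwise l pvKeyA).imp ?_
  intro a b hab
  rcases Prod.Lex.le_iff.mp hab with h | ⟨h, _⟩
  · exact le_of_lt h
  · exact le_of_eq h

theorem pvPt_eq (ps : List (Int × Int)) (k : Nat) : ps.getD k (0, 0) = pvPt ps k := rfl

theorem pvAValid_blockfree (ps : List (Int × Int)) (i j : Nat) :
    (pvAValid ps (i : Int) (j : Int) (pvPt ps i).1 (pvPt ps i).2 (pvPt ps j).1 (pvPt ps j).2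
      (PySem.List.pyRange 0 (ps.length : Int) 1) = true) ↔ pvBlockfree ps i j := by
  rw [pvAValid_iff]
  constructor
  · intro h k hk hki hkj hrect
    refine h (k : Int) ?_ ?_ ?_ ?_
    · rw [PySem.List.mem_pyRange_one]; omega
    · exact_mod_cast hki
    · exact_mod_cast hkj
    · simpa [PySem.List.pyGetD_natCast, pvPt] using hrect
  · intro h k hkmem hki hkj hrect
    rw [PySem.List.mem_pyRange_one] at hkmem
    obtain ⟨m, rfl⟩ : ∃ m : Nat, k = (m : Int) := ⟨k.toNat, (Int.toNat_of_nonneg hkmem.1).symm⟩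
    have hm : m < ps.length := by exact_mod_cast hkmem.2
    refine h m hm ?_ ?_ ?_
    · intro he; exact hki (show ((m : Nat) : Int) = ((i : Nat) : Int) from by exact_mod_cast he)
    · intro he; exact hkj (show ((m : Nat) : Int) = ((j : Nat) : Int) from by exact_mod_cast he)
    · simpa [PySem.List.pyGetD_natCast, pvPt] using hrect

theorem perA (ps : List (Int × Int)) (i : Nat) (_hi : i < ps.length) (c : Int) :
    pvAScan ps (ps.length : Int) (i : Int) (pvPt ps i).1 (pvPt ps i).2
      (PySem.List.sorted (pvACands ps (i : Int) (pvPt ps i).1 (pvPt ps i).2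
        (PySem.List.pyRange 0 (ps.length : Int) 1)) pvKeyA) c = c + pvCount ps i := by
  rw [pvAScan_eq _ _ _ _ _ _ (pvSortedA_pairwise _),
    List.Perm.countP_eq _ (PySem.List.sorted_perm _ _ _),
    pvACands_eq, PySem.List.pyRange_zero_natCast, List.filterMap_map, List.countP_filterMap]
  unfold pvCount
  congr 1
  refine congrArg _ (List.countP_congr ?_)
  intro j hj
  rw [List.mem_range] at hj
  simp only [Function.comp_apply, pvAf, PySem.List.pyGetD_natCast, pvPt_eq]
  constructor
  · intro hx
    split_ifs at hx with hcond
    · simp only [Option.map_some, Option.getD_some, pvAPred] at hx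
      rw [Bool.and_eq_true] at hx
      obtain ⟨h1, h2⟩ := hx
      rw [pvAValid_blockfree ps i j] at h2
      have hij : i ≠ j := by
        intro he; exact hcond.1 (show ((i : Nat) : Int) = ((j : Nat) : Int) by exact_mod_cast he)
      simp only [decide_eq_true_eq] at h1 ⊢
      exact ⟨Ne.symm hij, ⟨hcond.2.1, hcond.2.2⟩, by simpa [pvArea, pvPt] using h1, h2⟩
    · simp at hx
  · intro hx
    rw [decide_eq_true_eq] at hx
    obtain ⟨hji, hgeom, harea, hbf⟩ := hx
    have hcond : (i : Int) ≠ (j : Int) ∧ (pvPt ps i).1 ≤ (pvPt ps j).1 ∧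
        (pvPt ps i).2 ≥ (pvPt ps j).2 := by
      refine ⟨?_, hgeom.1, hgeom.2⟩
      intro he; exact hji (Nat.cast_inj.mp he).symm
    rw [if_pos hcond]
    simp only [Option.map_some, Option.getD_some, pvAPred]
    rw [Bool.and_eq_true]
    refine ⟨?_, ?_⟩
    · simp only [decide_eq_true_eq]
      simpa [pvArea, pvPt] using harea
    · exact (pvAValid_blockfree ps i j).mpr hbf

-- ---------- B side ----------

def pvBf (ps : List (Int × Int)) (i ax ay : Int) (j : Int) : Option (Int × Int) :=
  let b := PySem.List.pyGetD ps j (0, 0)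
  if j ≠ i ∧ ax ≤ b.1 ∧ b.2 ≤ ay then some b else none

theorem pvBCands_eq (ps : List (Int × Int)) (i ax ay : Int) (L : List Int) :
    pvBCands ps i ax ay L = L.filterMap (pvBf ps i ax ay) := by
  induction L with
  | nil => rfl
  | cons j js ih =>
    simp only [pvBCands, pvBf, List.filterMap_cons]
    split_ifs <;> simp_all [pvBf]

def pvBestLt : Option Int → Int → Prop
  | none, _ => True
  | some v, y => v < y

abbrev pvQ (M : List (Int × Int)) (n ax ay : Int) (p : Int × Int) : Prop :=
  (∀ q ∈ M, pvKeyB q < pvKeyB p → q.2 < p.2) ∧ M.count p = 1 ∧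
    (p.1 - ax + 1) * (ay - p.2 + 1) ≤ n

theorem pvKeyB_lt_iff (p q : Int × Int) :
    pvKeyB p < pvKeyB q ↔ p.1 < q.1 ∨ (p.1 = q.1 ∧ q.2 < p.2) := by
  simp only [pvKeyB, Prod.Lex.lt_iff, ofLex_toLex]
  constructor <;> (rintro (h | ⟨h1, h2⟩) <;> [exact Or.inl h; exact Or.inr ⟨h1, by omega⟩])

theorem pvKeyB_inj {p q : Int × Int} (h : pvKeyB p = pvKeyB q) : p = q := by
  obtain ⟨a, b⟩ := p; obtain ⟨c, d⟩ := q
  simp only [pvKeyB] at h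
  have h2 := congrArg ofLex h
  simp only [ofLex_toLex, Prod.mk.injEq] at h2
  obtain ⟨h3, h4⟩ := h2
  simp only [h3, Prod.mk.injEq, true_and]
  omega

theorem pvBSweep_cond (b : Option Int) (y : Int) :
    ((match b with | none => true | some v => decide (v < y)) = true) ↔ pvBestLt b y := by
  cases b <;> simp [pvBestLt]

theorem pvBSweep_eq (occ : PySem.Dict (Int × Int) Int) (M : List (Int × Int)) (n ax ay : Int)
    (hocc : ∀ p, occ.getD p 0 = (M.count p : Int)) :
    ∀ (T pre : List (Int × Int)) (b : Option Int) (c : Int),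
      ((pre ++ T).Pairwise fun a b => pvKeyB a ≤ pvKeyB b) →
      (pre ++ T).Perm M →
      (∀ y, pvBestLt b y ↔ ∀ q ∈ pre, q.2 < y) →
      pvBSweep occ n ax ay T b c =
        c + (T.countP (fun p => decide (pvQ M n ax ay p)) : Int) := by
  intro T
  induction T with
  | nil => intro pre b c _ _ _; simp [pvBSweep]
  | cons p t ih =>
    intro pre b c hpair hperm hbest
    have hpre_le : ∀ q ∈ pre, pvKeyB q ≤ pvKeyB p := by
      intro q hq
      exact (List.pairwise_append.mp hpair).2.2 q hq p (List.mem_cons_self ..)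
    have ht_ge : ∀ q ∈ t, pvKeyB p ≤ pvKeyB q := by
      have := (List.pairwise_append.mp hpair).2.1
      exact (List.pairwise_cons.mp this).1
    have hpair' : ((pre ++ [p]) ++ t).Pairwise fun a b => pvKeyB a ≤ pvKeyB b := by
      rwa [← List.append_cons]
    have hperm' : ((pre ++ [p]) ++ t).Perm M := by rwa [← List.append_cons]
    simp only [pvBSweep]
    by_cases hc : pvBestLt b p.2
    · rw [if_pos ((pvBSweep_cond b p.2).mpr hc)]
      have hallpre : ∀ q ∈ pre, q.2 < p.2 := (hbest p.2).mp hc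
      have hbest' : ∀ y, pvBestLt (some p.2) y ↔ ∀ q ∈ pre ++ [p], q.2 < y := by
        intro y
        simp only [pvBestLt, List.mem_append, List.mem_singleton]
        constructor
        · rintro hy q (hq | rfl)
          · exact lt_trans (hallpre q hq) hy
          · exact hy
        · intro hall; exact hall p (Or.inr rfl)
      rw [ih (pre ++ [p]) (some p.2) _ hpair' hperm' hbest']
      have hQ : pvQ M n ax ay p ↔ (M.count p = 1 ∧ (p.1 - ax + 1) * (ay - p.2 + 1) ≤ n) := by
        constructor
        · rintro ⟨_, h2, h3⟩; exact ⟨h2, h3⟩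
        · rintro ⟨h2, h3⟩
          refine ⟨?_, h2, h3⟩
          intro q hqM hlt
          rcases (List.mem_append.mp (hperm.mem_iff.mpr hqM)) with hq | hq
          · exact hallpre q hq
          · rcases List.mem_cons.mp hq with rfl | hq'
            · exact absurd hlt (lt_irrefl _)
            · exact absurd hlt (not_lt.mpr (ht_ge q hq'))
      rw [List.countP_cons]
      have hcnt1 : (occ.getD p 0 = 1 ∧ (p.1 - ax + 1) * (ay - p.2 + 1) ≤ n) ↔ pvQ M n ax ay p := by
        rw [hQ, hocc p]
        constructor
        · rintro ⟨h1, h2⟩; exact ⟨by exact_mod_cast h1, h2⟩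
        · rintro ⟨h1, h2⟩; exact ⟨by exact_mod_cast h1, h2⟩
      by_cases hqq : pvQ M n ax ay p
      · rw [if_pos (hcnt1.mpr hqq)]
        simp only [decide_eq_true hqq, reduceIte]
        push_cast; ring
      · rw [if_neg (fun hx => hqq (hcnt1.mp hx))]
        simp only [decide_eq_false hqq]
        push_cast; ring
    · rw [if_neg (fun hx => hc ((pvBSweep_cond b p.2).mp hx))]
      obtain ⟨v, rfl⟩ : ∃ v, b = some v := by
        cases b with
        | none => exact absurd trivial hc
        | some v => exact ⟨v, rfl⟩
      have hvp : p.2 ≤ v := by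
        simp only [pvBestLt] at hc; omega
      have hbest' : ∀ y, pvBestLt (some v) y ↔ ∀ q ∈ pre ++ [p], q.2 < y := by
        intro y
        simp only [pvBestLt, List.mem_append, List.mem_singleton]
        constructor
        · rintro hy q (hq | rfl)
          · exact (hbest y).mp hy q hq
          · omega
        · intro hall
          exact (hbest y).mpr (fun q hq => hall q (Or.inl hq))
      rw [ih (pre ++ [p]) (some v) _ hpair' hperm' hbest']
      have hnq : ¬ pvQ M n ax ay p := by
        rintro ⟨hdom, hcnt, _⟩
        have hnall : ¬ ∀ q ∈ pre, q.2 < p.2 := fun hall => hc ((hbest p.2).mpr hall)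
        have hex : ∃ q ∈ pre, ¬ q.2 < p.2 := by
          by_contra hno
          exact hnall fun q hq => by
            by_contra hq2
            exact hno ⟨q, hq, hq2⟩
        obtain ⟨q, hqpre, hqy⟩ := hex
        have hqM : q ∈ M := hperm.mem_iff.mp (List.mem_append.mpr (Or.inl hqpre))
        rcases lt_or_eq_of_le (hpre_le q hqpre) with hlt | heq
        · exact absurd (hdom q hqM hlt) (by omega)
        · have : q = p := pvKeyB_inj heq
          subst this
          have h2 : 2 ≤ M.count q := by
            rw [← hperm.count_eq, List.count_append, List.count_cons_self]
            have : 1 ≤ pre.count q := List.count_pos_iff.mpr hqpre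
            omega
          omega
      rw [List.countP_cons]
      simp only [decide_eq_false hnq]
      push_cast; ring

theorem pvCountP_eq_one_iff {l : List Nat} (hnd : l.Nodup) (p : Nat → Bool) (j : Nat)
    (hj : j ∈ l) (hpj : p j = true) :
    l.countP p = 1 ↔ ∀ k ∈ l, p k = true → k = j := by
  rw [List.countP_eq_length_filter]
  constructor
  · intro h1 k hk hpk
    obtain ⟨a, ha⟩ := List.length_eq_one_iff.mp h1
    have hj' : j ∈ l.filter p := List.mem_filter.mpr ⟨hj, hpj⟩
    have hk' : k ∈ l.filter p := List.mem_filter.mpr ⟨hk, hpk⟩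
    rw [ha, List.mem_singleton] at hj' hk'
    rw [hj', hk']
  · intro hall
    have hmem : j ∈ l.filter p := List.mem_filter.mpr ⟨hj, hpj⟩
    have hnf : (l.filter p).Nodup := hnd.filter p
    have hsub : ∀ x ∈ l.filter p, x = j := by
      intro x hx
      have := List.mem_filter.mp hx
      exact hall x this.1 this.2
    cases hf : l.filter p with
    | nil => rw [hf] at hmem; cases hmem
    | cons a as =>
      rw [hf] at hsub hnf
      cases as with
      | nil => rfl
      | cons x xs =>
        have hax : a = j := hsub a (List.mem_cons_self ..)
        have hxx : x = j := hsub x (List.mem_cons.mpr (Or.inr (List.mem_cons_self ..)))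
        rw [List.nodup_cons] at hnf
        have hmm : a ∈ x :: xs := by
          rw [hax, ← hxx]; exact List.mem_cons_self ..
        exact absurd hmm hnf.1

-- the candidate multiset of Alice i, indexed over Nat range
def pvC (ps : List (Int × Int)) (i : Nat) : List (Int × Int) :=
  (List.range ps.length).filterMap (fun k =>
    if k ≠ i ∧ (pvPt ps i).1 ≤ (pvPt ps k).1 ∧ (pvPt ps k).2 ≤ (pvPt ps i).2
    then some (pvPt ps k) else none)

theorem pvBCands_pvC (ps : List (Int × Int)) (i : Nat) :
    pvBCands ps (i : Int) (pvPt ps i).1 (pvPt ps i).2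
      (PySem.List.pyRange 0 (ps.length : Int) 1) = pvC ps i := by
  rw [pvBCands_eq, PySem.List.pyRange_zero_natCast, List.filterMap_map]
  refine List.filterMap_congr ?_
  intro k _
  simp only [Function.comp_apply, pvBf, PySem.List.pyGetD_natCast, pvPt_eq]
  by_cases h : k ≠ i ∧ (pvPt ps i).1 ≤ (pvPt ps k).1 ∧ (pvPt ps k).2 ≤ (pvPt ps i).2
  · rw [if_pos ⟨by exact_mod_cast h.1, h.2.1, h.2.2⟩, if_pos h]
  · rw [if_neg (fun hc => h ⟨by exact_mod_cast hc.1, hc.2.1, hc.2.2⟩), if_neg h]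

theorem pvC_mem (ps : List (Int × Int)) (i : Nat) (q : Int × Int) :
    q ∈ pvC ps i ↔ ∃ k, k < ps.length ∧ k ≠ i ∧ (pvPt ps i).1 ≤ (pvPt ps k).1 ∧
      (pvPt ps k).2 ≤ (pvPt ps i).2 ∧ q = pvPt ps k := by
  simp only [pvC, List.mem_filterMap, List.mem_range, Option.ite_none_right_eq_some,
    Option.some.injEq]
  constructor
  · rintro ⟨k, hk, ⟨h1, h2, h3⟩, h4⟩; exact ⟨k, hk, h1, h2, h3, h4.symm⟩
  · rintro ⟨k, hk, h1, h2, h3, h4⟩; exact ⟨k, hk, ⟨h1, h2, h3⟩, h4.symm⟩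

theorem pvC_count (ps : List (Int × Int)) (i : Nat) (p : Int × Int) :
    (pvC ps i).count p = (List.range ps.length).countP
      (fun k => decide (k ≠ i ∧ (pvPt ps i).1 ≤ (pvPt ps k).1 ∧
        (pvPt ps k).2 ≤ (pvPt ps i).2 ∧ pvPt ps k = p)) := by
  rw [List.count_eq_countP, pvC, List.countP_filterMap]
  refine List.countP_congr ?_
  intro k _
  by_cases h : k ≠ i ∧ (pvPt ps i).1 ≤ (pvPt ps k).1 ∧ (pvPt ps k).2 ≤ (pvPt ps i).2
  · simp only [if_pos h, Option.map_some, Option.getD_some, beq_iff_eq, decide_eq_true_eq]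
    constructor
    · intro he; exact ⟨h.1, h.2.1, h.2.2, he⟩
    · intro hx; exact hx.2.2.2
  · simp only [if_neg h, Option.map_none, Option.getD_none, Bool.false_eq_true, false_iff,
      decide_eq_true_eq]
    intro hx; exact h ⟨hx.1, hx.2.1, hx.2.2.1⟩

theorem pvQ_iff (ps : List (Int × Int)) (i j : Nat) (hj : j < ps.length) (hji : j ≠ i)
    (hgeom : (pvPt ps i).1 ≤ (pvPt ps j).1 ∧ (pvPt ps j).2 ≤ (pvPt ps i).2) :
    pvQ (pvC ps i) (ps.length : Int) (pvPt ps i).1 (pvPt ps i).2 (pvPt ps j) ↔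
      (pvArea ps i j ≤ (ps.length : Int) ∧ pvBlockfree ps i j) := by
  have hpj : (fun k => decide (k ≠ i ∧ (pvPt ps i).1 ≤ (pvPt ps k).1 ∧
      (pvPt ps k).2 ≤ (pvPt ps i).2 ∧ pvPt ps k = pvPt ps j)) j = true := by
    simp [hji, hgeom.1, hgeom.2]
  constructor
  · rintro ⟨hdom, hcnt, harea⟩
    refine ⟨by simpa [pvArea] using harea, ?_⟩
    have huniq := (pvCountP_eq_one_iff List.nodup_range _ j (List.mem_range.mpr hj) hpj).mp
      (by rw [← pvC_count]; exact hcnt)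
    intro k hk hki hkj hrect
    obtain ⟨hrx1, hrx2, hry1, hry2⟩ := hrect
    by_cases heq : pvPt ps k = pvPt ps j
    · exact hkj (huniq k (List.mem_range.mpr hk) (by simp only [decide_eq_true_eq]; exact ⟨hki, hrx1, hry2, heq⟩))
    · have hqmem : pvPt ps k ∈ pvC ps i :=
        (pvC_mem ps i _).mpr ⟨k, hk, hki, hrx1, hry2, rfl⟩
      have hklt : pvKeyB (pvPt ps k) < pvKeyB (pvPt ps j) := by
        rw [pvKeyB_lt_iff]
        rcases lt_or_eq_of_le hrx2 with hx | hx
        · exact Or.inl hx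
        · refine Or.inr ⟨hx, ?_⟩
          have hy : (pvPt ps k).2 ≠ (pvPt ps j).2 := fun hy => heq (Prod.ext hx hy)
          omega
      have := hdom _ hqmem hklt
      omega
  · rintro ⟨harea, hbf⟩
    refine ⟨?_, ?_, by simpa [pvArea] using harea⟩
    · intro q hq hlt
      obtain ⟨k, hk, hki, hg1, hg2, rfl⟩ := (pvC_mem ps i q).mp hq
      by_contra hcon
      have hcon' : (pvPt ps j).2 ≤ (pvPt ps k).2 := by omega
      have hkj : k ≠ j := by
        rintro rfl
        exact absurd hlt (lt_irrefl _)
      have hxk : (pvPt ps k).1 ≤ (pvPt ps j).1 := by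
        rcases (pvKeyB_lt_iff _ _).mp hlt with h | ⟨h, _⟩ <;> omega
      exact hbf k hk hki hkj ⟨hg1, hxk, hcon', hg2⟩
    · rw [pvC_count]
      rw [pvCountP_eq_one_iff List.nodup_range _ j (List.mem_range.mpr hj) hpj]
      intro k hk hpk
      simp only [decide_eq_true_eq] at hpk
      obtain ⟨hki, hg1, hg2, heq⟩ := hpk
      by_contra hkj
      have hx : (pvPt ps k).1 = (pvPt ps j).1 := congrArg Prod.fst heq
      have hy : (pvPt ps k).2 = (pvPt ps j).2 := congrArg Prod.snd heq
      exact hbf k (List.mem_range.mp hk) hki hkj ⟨hg1, by omega, by omega, hg2⟩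

theorem perB (ps : List (Int × Int)) (i : Nat) (_hi : i < ps.length) (c : Int) :
    (pvBSweep ((pvBCands ps (i : Int) (pvPt ps i).1 (pvPt ps i).2
        (PySem.List.pyRange 0 (ps.length : Int) 1)).foldl
          (fun d p => d.insert p (d.getD p 0 + 1)) PySem.Dict.empty)
       (ps.length : Int) (pvPt ps i).1 (pvPt ps i).2
       (PySem.List.sorted (pvBCands ps (i : Int) (pvPt ps i).1 (pvPt ps i).2
        (PySem.List.pyRange 0 (ps.length : Int) 1)) pvKeyB) none c) = c + pvCount ps i := by
  rw [pvBCands_pvC ps i]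
  have hocc : ∀ p, ((pvC ps i).foldl (fun d p => d.insert p (d.getD p 0 + 1))
      PySem.Dict.empty).getD p 0 = ((pvC ps i).count p : Int) := by
    intro p
    rw [PySem.Dict.foldl_insert_getD_add_one_eq_counter, PySem.Dict.getD_counter]
  rw [pvBSweep_eq _ (pvC ps i) _ _ _ hocc (PySem.List.sorted (pvC ps i) pvKeyB) [] none c
      (by simpa using PySem.List.sorted_pairwise (pvC ps i) pvKeyB)
      (by simpa using PySem.List.sorted_perm (pvC ps i) pvKeyB false)
      (by intro y; simp [pvBestLt]),
    List.Perm.countP_eq _ (PySem.List.sorted_perm _ _ _)]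
  unfold pvCount
  congr 1
  conv_lhs => rw [pvC]
  rw [List.countP_filterMap]
  refine congrArg _ (List.countP_congr ?_)
  intro j hjr
  rw [List.mem_range] at hjr
  constructor
  · intro hx
    by_cases hcond : j ≠ i ∧ (pvPt ps i).1 ≤ (pvPt ps j).1 ∧ (pvPt ps j).2 ≤ (pvPt ps i).2
    · rw [if_pos hcond, Option.map_some, Option.getD_some, decide_eq_true_eq] at hx
      have hres := (pvQ_iff ps i j hjr hcond.1 ⟨hcond.2.1, hcond.2.2⟩).mp hx
      rw [decide_eq_true_eq]
      exact ⟨hcond.1, ⟨hcond.2.1, hcond.2.2⟩, hres.1, hres.2⟩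
    · rw [if_neg hcond] at hx
      simp at hx
  · intro hx
    rw [decide_eq_true_eq] at hx
    obtain ⟨hji, hgeom, harea, hbf⟩ := hx
    rw [if_pos ⟨hji, hgeom.1, hgeom.2⟩, Option.map_some, Option.getD_some, decide_eq_true_eq]
    exact (pvQ_iff ps i j hjr hji hgeom).mpr ⟨harea, hbf⟩

-- ===== VERDICT (by name: the statement is the Claim_ definition above) =====
theorem sparse_case_solution_py_spec : Claim_equal_sparse_case_solution_py := by
  intro ps _
  show sparse_case_solution_py ps = sparse_case_solution_py_alt ps
  simp only [sparse_case_solution_py, sparse_case_solution_py_alt]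
  refine PySem.List.foldl_congr_mem _ _ _ _ ?_
  intro c x hx
  rw [PySem.List.mem_pyRange_one] at hx
  obtain ⟨k, rfl⟩ : ∃ k : Nat, x = (k : Int) := ⟨x.toNat, (Int.toNat_of_nonneg hx.1).symm⟩
  have hk : k < ps.length := by exact_mod_cast hx.2
  have hA := perA ps k hk c
  have hB := perB ps k hk c
  simp only [PySem.List.pyGetD_natCast] at *
  simp only [pvPt] at hA hB
  rw [hA, hB]
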